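-- pv_equiv track=rewrite | github.com/pypi-data/pypi-mirror-207 | packages/inverse/inverse-0.0.11-py3-none-any.whl/inverse/src/engine/algos_save/_save_sparse.py | get_zeros_and_values
-- ===== SOURCE A (Python) =====
-- def get_zeros_and_values(coords, values, n):
--     values_ = []
--     # [ 0 , 5 , 12 ] [ 1 , 2 , 3 ]
--     for i in range(n):
--         if i not in coords:
--             values_.append(0)
--         else:
--             values_.append(values.pop())
--     return values_
-- ===== SOURCE B (Python) =====
-- def get_zeros_and_values(coords, values, n):
--     active = sorted({i for i in coords if 0 <= i < n})
--     assign = {}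
--     for i in active:
--         assign[i] = values.pop()
--     return [assign.get(i, 0) for i in range(n)]
-- ===== Notes on version B (the rewrite author's own statement) =====
-- stated objective: faster
-- what changed: B never scans range(n) for membership: it sorts the set of in-range coords, pops values into a dict keyed by those indices, and emits the dense row by dict lookup, replacing A's per-index 'i in coords' list scan.
import Mathlib
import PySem

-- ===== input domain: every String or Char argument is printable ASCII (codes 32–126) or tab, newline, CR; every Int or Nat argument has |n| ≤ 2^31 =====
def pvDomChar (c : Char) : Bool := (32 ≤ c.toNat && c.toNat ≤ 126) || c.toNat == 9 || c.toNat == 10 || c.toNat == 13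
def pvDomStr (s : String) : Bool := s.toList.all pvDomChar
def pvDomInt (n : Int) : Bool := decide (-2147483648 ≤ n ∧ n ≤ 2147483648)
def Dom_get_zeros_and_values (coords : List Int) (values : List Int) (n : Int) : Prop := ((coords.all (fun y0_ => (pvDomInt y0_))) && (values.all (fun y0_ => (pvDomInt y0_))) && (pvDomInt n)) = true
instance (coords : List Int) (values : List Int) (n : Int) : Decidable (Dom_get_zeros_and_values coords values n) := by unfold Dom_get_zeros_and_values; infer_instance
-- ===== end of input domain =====

-- B replaces A's per-index membership scan of coords by sorting the set of in-range
-- coords and scattering popped values through a dict keyed by index (faster: no inner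
-- list scan per index); in Python both mutate `values` identically (emptied by pop);
-- the equivalence proved here is about the return value.


-- ===== PORT A =====
-- values.pop() is ported as (getLast?.getD 0, dropLast): exact whenever values is
-- nonempty at the pop; Pre_ excludes exactly the underflow inputs (Python IndexError).
-- the loop accumulates values_ front-first (reversed accumulator, reversed at the end):
-- the standard linear transliteration of Python's append loop.
def get_zeros_and_values (coords : List Int) (values : List Int) (n : Int) : List Int :=
  (((PySem.List.pyRange 0 n 1).foldl
    (fun (st : List Int × List Int) i =>
      if i ∉ coords then ((0 : Int) :: st.1, st.2)
      else (st.2.getLast?.getD 0 :: st.1, st.2.dropLast))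
    ([], values)).1).reverse

-- ===== PORT B =====
-- active = sorted({i for i in coords if 0 <= i < n}); assign[i] = values.pop() over active;
-- return [assign.get(i, 0) for i in range(n)].  pop ported as on the A side.
def get_zeros_and_values_alt (coords : List Int) (values : List Int) (n : Int) : List Int :=
  let active := PySem.List.sorted
    (PySem.Set.ofList (coords.filter (fun i => decide (0 ≤ i ∧ i < n)))) (fun x => x) false
  let st := active.foldl
    (fun (st : PySem.Dict Int Int × List Int) i =>
      (st.1.insert i (st.2.getLast?.getD 0), st.2.dropLast))
    (PySem.Dict.empty, values)
  (PySem.List.pyRange 0 n 1).map (fun i => st.1.getD i 0)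

-- ===== PRECONDITION & SPEC =====
-- Pre_ excludes exactly the inputs where Python's values.pop() underflows (IndexError
-- in both A and B): more in-range indices hit coords than there are values.
def Pre_get_zeros_and_values (coords : List Int) (values : List Int) (n : Int) : Prop :=
  (PySem.Set.ofList (coords.filter (fun i => decide (0 ≤ i ∧ i < n)))).length ≤ values.length
instance (coords : List Int) (values : List Int) (n : Int) : Decidable (Pre_get_zeros_and_values coords values n) := by unfold Pre_get_zeros_and_values; infer_instance
def pvWitness_get_zeros_and_values : List Int × List Int × Int := ([0, 2], [5, 7], 3)

def Spec_get_zeros_and_values (coords : List Int) (values : List Int) (n : Int) (out : List Int) : Prop := out = get_zeros_and_values_alt coords values n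
instance (coords : List Int) (values : List Int) (n : Int) (out : List Int) : Decidable (Spec_get_zeros_and_values coords values n out) := by unfold Spec_get_zeros_and_values; infer_instance

-- ===== CLAIM (what is proved, stated in full; the proofs are below) =====
def Claim_equal_get_zeros_and_values : Prop := ∀ (coords : List Int) (values : List Int) (n : Int), Dom_get_zeros_and_values coords values n → Pre_get_zeros_and_values coords values n → Spec_get_zeros_and_values coords values n (get_zeros_and_values coords values n)

-- ===== LEMMAS AND PROOFS =====

-- The two loop bodies, named for the lemmas.
def pvStepA (coords : List Int) (st : List Int × List Int) (i : Int) : List Int × List Int :=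
  if i ∉ coords then ((0 : Int) :: st.1, st.2)
  else (st.2.getLast?.getD 0 :: st.1, st.2.dropLast)

def pvStepD (st : PySem.Dict Int Int × List Int) (i : Int) : PySem.Dict Int Int × List Int :=
  (st.1.insert i (st.2.getLast?.getD 0), st.2.dropLast)

-- The in-range members of coords in increasing order, and B's dict/values state after m steps.
def pvAct (coords : List Int) (m : Nat) : List Int :=
  ((List.range m).map (Int.ofNat)).filter (fun i => decide (i ∈ coords))

def pvSt (coords vs : List Int) (m : Nat) : PySem.Dict Int Int × List Int :=
  (pvAct coords m).foldl pvStepD (PySem.Dict.empty, vs)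

-- A key never inserted keeps its default through B's scatter fold.
theorem pvD_getD_notmem (act : List Int) (d : PySem.Dict Int Int) (vs : List Int)
    (k : Int) (hk : k ∉ act) :
    (act.foldl pvStepD (d, vs)).1.getD k 0 = d.getD k 0 := by
  induction act generalizing d vs with
  | nil => simp
  | cons i t ih =>
      simp only [List.mem_cons, not_or] at hk
      simp only [List.foldl_cons, pvStepD]
      rw [ih _ _ hk.2, PySem.Dict.getD_insert, if_neg hk.1]

theorem pvAct_mem (coords : List Int) (m : Nat) (i : Int) (hi : i ∈ pvAct coords m) :
    ∃ k : Nat, k < m ∧ i = Int.ofNat k := by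
  simp only [pvAct, List.mem_filter, List.mem_map, List.mem_range] at hi
  obtain ⟨⟨k, hk, rfl⟩, _⟩ := hi
  exact ⟨k, hk, rfl⟩

theorem pvAct_succ (coords : List Int) (m : Nat) :
    pvAct coords (m + 1)
      = pvAct coords m ++ (([Int.ofNat m]).filter (fun i => decide (i ∈ coords))) := by
  simp only [pvAct, List.range_succ, List.map_append, List.filter_append, List.map_cons,
    List.map_nil]

-- Main invariant: A's fold state over range m = (dense row read off B's dict, B's remaining values).
theorem pvMain (coords vs : List Int) (m : Nat) :
    ((List.range m).map (Int.ofNat)).foldl (pvStepA coords) ([], vs)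
      = ((((List.range m).map (Int.ofNat)).map (fun i => (pvSt coords vs m).1.getD i 0)).reverse,
         (pvSt coords vs m).2) := by
  induction m with
  | zero => simp [pvSt, pvAct]
  | succ m ih =>
      have hst : pvSt coords vs (m + 1)
          = (([Int.ofNat m]).filter (fun i => decide (i ∈ coords))).foldl pvStepD
              (pvSt coords vs m) := by
        simp only [pvSt, pvAct_succ, List.foldl_append]
      rw [List.range_succ, List.map_append, List.foldl_append, ih]
      by_cases hc : (Int.ofNat m) ∈ coords
      · have hf : (([Int.ofNat m] : List Int).filter (fun i => decide (i ∈ coords)))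
            = [Int.ofNat m] := by
          simp only [List.filter_cons, List.filter_nil]
          rw [if_pos (decide_eq_true hc)]
        have hst' : pvSt coords vs (m + 1) = pvStepD (pvSt coords vs m) (Int.ofNat m) := by
          rw [hst, hf]; rfl
        simp only [List.map_cons, List.map_nil, List.foldl_cons, List.foldl_nil]
        simp only [pvStepA]
        rw [if_neg (not_not_intro hc)]
        rw [hst']
        simp only [pvStepD, Prod.mk.injEq]
        refine ⟨?_, trivial⟩
        rw [List.map_append, List.reverse_append]
        simp only [List.map_cons, List.map_nil, List.reverse_cons, List.reverse_nil,
          List.nil_append, List.cons_append, List.nil_append]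
        congr 1
        · simp [PySem.Dict.getD_insert_self]
        · congr 1
          apply List.map_congr_left
          intro i hi
          simp only [List.mem_map, List.mem_range] at hi
          obtain ⟨k, hk, rfl⟩ := hi
          have hne : (Int.ofNat k) ≠ (Int.ofNat m) := by
            simp only [Int.ofNat_eq_natCast, ne_eq, Nat.cast_inj]
            omega
          rw [PySem.Dict.getD_insert, if_neg hne]
      · have hf : (([Int.ofNat m] : List Int).filter (fun i => decide (i ∈ coords)))
            = [] := by
          simp only [List.filter_cons, List.filter_nil]
          rw [if_neg (by simpa using hc)]
        have hst' : pvSt coords vs (m + 1) = pvSt coords vs m := by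
          rw [hst, hf]; rfl
        have hnm : (Int.ofNat m) ∉ pvAct coords m := by
          intro h
          obtain ⟨k, hk, hkeq⟩ := pvAct_mem coords m _ h
          simp only [Int.ofNat_eq_natCast, Nat.cast_inj] at hkeq
          omega
        have h0 : (pvSt coords vs m).1.getD (Int.ofNat m) 0 = 0 := by
          simp only [pvSt]
          rw [pvD_getD_notmem _ _ _ _ hnm]
          simp
        rw [Int.ofNat_eq_natCast] at h0
        simp only [List.map_cons, List.map_nil, List.foldl_cons, List.foldl_nil]
        simp only [pvStepA]
        rw [if_pos hc, hst', List.map_append, List.reverse_append]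
        simp [h0]

-- B's active list IS the increasing enumeration of the in-range members of coords.
theorem pvActive_eq (coords : List Int) (n : Int) :
    PySem.List.sorted
      (PySem.Set.ofList (coords.filter (fun i => decide (0 ≤ i ∧ i < n)))) (fun x => x) false
      = pvAct coords n.toNat := by
  apply PySem.List.sorted_eq_of_perm_of_pairwise_lt
  · rw [List.perm_ext_iff_of_nodup]
    · intro a
      simp only [pvAct, List.mem_filter, List.mem_map, List.mem_range,
        PySem.Set.mem_ofList, decide_eq_true_eq]
      constructor
      · rintro ⟨⟨k, hk, rfl⟩, hmem⟩
        refine ⟨hmem, ?_, ?_⟩ <;> simp only [Int.ofNat_eq_natCast] <;> omega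
      · rintro ⟨hmem, h0, hn⟩
        refine ⟨⟨a.toNat, by omega, ?_⟩, hmem⟩
        simp only [Int.ofNat_eq_natCast]
        omega
    · apply List.Nodup.filter
      exact (List.nodup_range).map (fun a b h => by
        simpa only [Int.ofNat_eq_natCast, Nat.cast_inj] using h)
    · exact PySem.Set.nodup_ofList _
  · apply List.Pairwise.filter
    apply List.pairwise_map.mpr
    apply List.Pairwise.imp ?_ (List.pairwise_lt_range)
    intro a b h
    simpa using h

-- pyRange 0 n 1 is the mapped List.range n.toNat.
theorem pvRange_eq (n : Int) :
    PySem.List.pyRange 0 n 1 = (List.range n.toNat).map (Int.ofNat) := by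
  rw [PySem.List.pyRange_one]
  simp

-- ===== VERDICT (by name: the statement is the Claim_ definition above) =====
theorem get_zeros_and_values_spec : Claim_equal_get_zeros_and_values := by
  intro coords values n _ _
  unfold Spec_get_zeros_and_values get_zeros_and_values get_zeros_and_values_alt
  rw [pvRange_eq, pvActive_eq]
  show ((((List.range n.toNat).map Int.ofNat).foldl (pvStepA coords) ([], values)).1).reverse
      = ((List.range n.toNat).map Int.ofNat).map
          (fun i => ((pvAct coords n.toNat).foldl pvStepD (PySem.Dict.empty, values)).1.getD i 0)
  rw [pvMain, List.reverse_reverse]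
  rfl
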